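-- pv_equiv track=rewrite | github.com/senadkurtisi/pytorch-image-captioning | utils/dataset_utils.py | clean_captions
-- ===== SOURCE A (Python) =====
-- import string
--
-- def preprocess_caption(caption):
--     """Performs caption preprocessing"""
--     punct_table = str.maketrans("", "", string.punctuation)
--     # Extract separate tokens
--     caption = caption.split()
--     # Make tokens lowercase
--     caption = [word.lower() for word in caption]
--     # Remove punctuation
--     caption = [word.translate(punct_table) for word in caption]
--     # Remove trailing "'s" or "a"
--     caption = [word for word in caption if len(word) > 1]
--     # Remove tokens which contain number
--     caption = [word for word in caption if word.isalpha()]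
--     return " ".join(caption)
--
-- def clean_captions(id2annotation):
--     """Cleans the loaded image captions.
--
--     Makes tokens lowercase. Removes punctuation. Removes some stop words.
--
--     Arguments:
--         image2caption (dict): Mapping from image id to all
--             captions of that image that occured in the dataset
--     Returns:
--         image2caption_clean (dict): Mapping from image id to
--             cleaned captions of that image
--     """
--     image2caption_clean = id2annotation.copy()
--     for image_id, captions in id2annotation.items():
--         for i in range(len(captions)):
--             caption = captions[i]
--             # Preprocess caption
--             clean_caption = preprocess_caption(caption)
--             # Save the cleaned caption
--             image2caption_clean[image_id][i] =  clean_caption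
--
--     return image2caption_clean
-- ===== SOURCE B (Python) =====
-- import string
--
-- def preprocess_caption(caption):
--     """Character-level state machine: a single scan over the raw string.
--     Tokens are delimited by whitespace; each kept character is lowercased and
--     punctuation is dropped on the fly; a flag tracks whether the token is all
--     letters, and the token is emitted only if it has length > 1 and is alphabetic."""
--     tokens = []
--     buf = []
--     alpha = True
--     for ch in caption:
--         if ch.isspace():
--             if len(buf) > 1 and alpha:
--                 tokens.append("".join(buf))
--             buf = []
--             alpha = True
--         else:
--             c = ch.lower()
--             if c not in string.punctuation:
--                 buf.append(c)
--                 if not c.isalpha():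
--                     alpha = False
--     if len(buf) > 1 and alpha:
--         tokens.append("".join(buf))
--     return " ".join(tokens)
--
-- def clean_captions(id2annotation):
--     return {image_id: [preprocess_caption(caption) for caption in captions]
--             for image_id, captions in id2annotation.items()}
-- ===== Notes on version B (the rewrite author's own statement) =====
-- stated objective: faster
-- what changed: preprocess_caption is rewritten from split-then-five-staged-passes over a token list into a character-level state machine: one scan of the raw string with a token buffer and an all-letters flag, lowercasing and dropping punctuation per character and emitting a token at each whitespace boundary; clean_captions builds a fresh dict by comprehension instead of mutating through a shallow copy (return values identical, A additionally mutates its argument in place).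
import Mathlib
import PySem

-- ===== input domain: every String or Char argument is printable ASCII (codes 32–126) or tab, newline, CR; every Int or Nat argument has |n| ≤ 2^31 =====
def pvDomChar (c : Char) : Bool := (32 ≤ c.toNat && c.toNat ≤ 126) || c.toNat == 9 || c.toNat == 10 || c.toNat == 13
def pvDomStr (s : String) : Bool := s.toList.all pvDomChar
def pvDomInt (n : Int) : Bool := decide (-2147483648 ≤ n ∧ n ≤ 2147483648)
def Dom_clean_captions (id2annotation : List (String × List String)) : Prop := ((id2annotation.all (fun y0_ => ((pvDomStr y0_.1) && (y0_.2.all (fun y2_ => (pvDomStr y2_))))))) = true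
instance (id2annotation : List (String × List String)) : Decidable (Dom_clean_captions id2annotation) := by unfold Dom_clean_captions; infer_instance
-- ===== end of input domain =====

-- B replaces A's split-then-five-staged-passes preprocessing by a character-level state machine
-- (one scan with a token buffer and an all-letters flag); equal return value. A mutates the caller's
-- caption lists in place through a shallow dict copy and B does not: the equivalence proved here is
-- about the return value only.

-- ===== PORT A =====
-- string.punctuation (ASCII); word.translate(punct_table) deletes exactly these characters — exact on the ASCII domain
def pvPunct : List Char := "!\"#$%&'()*+,-./:;<=>?@[\\]^_`{|}~".toList

def preprocess_caption_A (caption : String) : String :=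
  let toks := PySem.Chars.split₀ caption.toList
  let toks := toks.map (fun word => PySem.Chars.lower word)
  let toks := toks.map (fun word => word.filter (fun c => !pvPunct.contains c))
  let toks := toks.filter (fun word => word.length > 1)
  let toks := toks.filter (fun word => PySem.Chars.strIsalpha word)
  String.ofList (PySem.Chars.join [' '] toks)

-- "for i in range(len(captions)): image2caption_clean[image_id][i] = preprocess_caption(captions[i])"
def pvCleanLoopA (captions : List String) : List String :=
  (PySem.List.pyRange 0 (captions.length : Int) 1).foldl
    (fun cs i => cs.set i.toNat (preprocess_caption_A (PySem.List.pyGetD cs i ""))) captions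

def clean_captions (id2annotation : List (String × List String)) : List (String × List String) :=
  id2annotation.map (fun p => (p.1, pvCleanLoopA p.2))

-- ===== PORT B =====
-- the for-loop of B's preprocess_caption: state = (tokens, buf, alpha); the [] case is the final flush
def pbFold (s : List Char) (tokens : List (List Char)) (buf : List Char) (alpha : Bool) :
    List (List Char) :=
  match s with
  | [] => if buf.length > 1 && alpha then tokens ++ [buf] else tokens
  | ch :: rest =>
    if PySem.Chars.isspace ch then
      pbFold rest (if buf.length > 1 && alpha then tokens ++ [buf] else tokens) [] true
    else
      let c := PySem.Chars.lowerChar ch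
      if pvPunct.contains c then pbFold rest tokens buf alpha
      else pbFold rest tokens (buf ++ [c]) (alpha && PySem.Chars.isalpha c)

def preprocess_caption_B (caption : String) : String :=
  String.ofList (PySem.Chars.join [' '] (pbFold caption.toList [] [] true))

def clean_captions_alt (id2annotation : List (String × List String)) : List (String × List String) :=
  id2annotation.map (fun p => (p.1, p.2.map preprocess_caption_B))

-- ===== PRECONDITION & SPEC =====
def Spec_clean_captions (id2annotation : List (String × List String)) (out : List (String × List String)) : Prop := out = clean_captions_alt id2annotation
instance (id2annotation : List (String × List String)) (out : List (String × List String)) : Decidable (Spec_clean_captions id2annotation out) := by unfold Spec_clean_captions; infer_instance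

-- ===== CLAIM (what is proved, stated in full; the proofs are below) =====
def Claim_equal_clean_captions : Prop := ∀ (id2annotation : List (String × List String)), Dom_clean_captions id2annotation → Spec_clean_captions id2annotation (clean_captions id2annotation)

-- ===== LEMMAS AND PROOFS =====

-- what A does to one raw token (lower, then drop punctuation)
def pvG (w : List Char) : List Char :=
  (PySem.Chars.lower w).filter (fun c => !pvPunct.contains c)

-- A's four staged passes applied to a token list
def pvKept (ws : List (List Char)) : List (List Char) :=
  ((ws.map pvG).filter (fun w => w.length > 1)).filter (fun w => PySem.Chars.strIsalpha w)

theorem append_if_single {α : Type} (xs : List α) (b : Bool) (w : α) :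
    (if b = true then xs ++ [w] else xs) = xs ++ (if b = true then [w] else []) := by
  cases b <;> simp

theorem pvKept_append_single (ws : List (List Char)) (w : List Char) :
    pvKept (ws ++ [w]) =
      pvKept ws ++
        (if (pvG w).length > 1 && (pvG w).all PySem.Chars.isalpha then [pvG w] else []) := by
  by_cases h1 : (pvG w).length > 1
  · by_cases h2 : (pvG w).all PySem.Chars.isalpha = true
    · have h3 : PySem.Chars.strIsalpha (pvG w) = true := by
        cases hg : pvG w with
        | nil => rw [hg] at h1; simp at h1
        | cons c cs =>
          rw [hg] at h2
          simp only [PySem.Chars.strIsalpha, List.isEmpty_cons, Bool.not_false, Bool.true_and]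
          exact h2
      simp [pvKept, List.filter_append, h1, h2, h3]
    · have h3 : PySem.Chars.strIsalpha (pvG w) = false := by
        rw [Bool.not_eq_true] at h2
        simp [PySem.Chars.strIsalpha, h2]
      rw [Bool.not_eq_true] at h2
      simp [pvKept, List.filter_append, h1, h2, h3]
  · simp [pvKept, List.filter_append, h1]

theorem pvG_append_single (w : List Char) (c : Char) :
    pvG (w ++ [c]) =
      pvG w ++ (if pvPunct.contains (PySem.Chars.lowerChar c) then []
                else [PySem.Chars.lowerChar c]) := by
  simp [pvG, PySem.Chars.lower, List.filter_append, List.filter]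
  split_ifs <;> simp_all

-- the state machine, run with buf = the processed current raw word, equals A's staged passes over split₀
theorem pbFold_eq_kept :
    ∀ (s cur : List Char) (acc : List (List Char)),
      pbFold s (pvKept acc.reverse) (pvG cur.reverse) ((pvG cur.reverse).all PySem.Chars.isalpha)
        = pvKept (PySem.Chars.split₀.go s cur acc) := by
  intro s
  induction s with
  | nil =>
    intro cur acc
    rw [PySem.Chars.split₀.go]
    cases cur with
    | nil => simp [pbFold, pvG, PySem.Chars.lower]
    | cons c cs =>
      rw [if_neg (by simp)]
      show (if ((pvG (c :: cs).reverse).length > 1 && (pvG (c :: cs).reverse).all PySem.Chars.isalpha) = true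
            then pvKept acc.reverse ++ [pvG (c :: cs).reverse] else pvKept acc.reverse)
          = pvKept ((c :: cs).reverse :: acc).reverse
      rw [show ((c :: cs).reverse :: acc).reverse = acc.reverse ++ [(c :: cs).reverse] from by
            rw [List.reverse_cons],
          pvKept_append_single, ← append_if_single]
  | cons ch rest ih =>
    intro cur acc
    rw [PySem.Chars.split₀.go]
    by_cases hsp : PySem.Chars.isspace ch = true
    · rw [if_pos hsp,
        show pbFold (ch :: rest) (pvKept acc.reverse) (pvG cur.reverse)
              ((pvG cur.reverse).all PySem.Chars.isalpha)
            = pbFold rest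
                (if ((pvG cur.reverse).length > 1 && (pvG cur.reverse).all PySem.Chars.isalpha) = true
                 then pvKept acc.reverse ++ [pvG cur.reverse] else pvKept acc.reverse) [] true from by
          simp [pbFold, hsp]]
      cases cur with
      | nil =>
        rw [if_neg (show ¬(((pvG (([] : List Char)).reverse).length > 1 &&
              (pvG (([] : List Char)).reverse).all PySem.Chars.isalpha) = true) by decide),
            if_pos (show (([] : List Char).isEmpty = true) from rfl)]
        exact ih [] acc
      | cons c cs =>
        rw [if_neg (show ¬((c :: cs).isEmpty = true) by simp), append_if_single]
        have h := ih [] ((c :: cs).reverse :: acc)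
        rw [show pvG (([] : List Char).reverse) = [] from rfl,
            show (([] : List Char).all PySem.Chars.isalpha) = true from rfl,
            show ((c :: cs).reverse :: acc).reverse = acc.reverse ++ [(c :: cs).reverse] from by
              rw [List.reverse_cons],
            pvKept_append_single] at h
        exact h
    · rw [if_neg hsp]
      by_cases hp : pvPunct.contains (PySem.Chars.lowerChar ch) = true
      · have hp' : PySem.Chars.lowerChar ch ∈ pvPunct := by simpa using hp
        have hgl : pvG ((ch :: cur).reverse) = pvG cur.reverse := by
          rw [List.reverse_cons, pvG_append_single, if_pos hp, List.append_nil]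
        have h := ih (ch :: cur) acc
        rw [hgl] at h
        rw [show pbFold (ch :: rest) (pvKept acc.reverse) (pvG cur.reverse)
              ((pvG cur.reverse).all PySem.Chars.isalpha)
            = pbFold rest (pvKept acc.reverse) (pvG cur.reverse)
              ((pvG cur.reverse).all PySem.Chars.isalpha) from by simp [pbFold, hsp, hp']]
        exact h
      · have hp' : PySem.Chars.lowerChar ch ∉ pvPunct := by simpa using hp
        have hgl : pvG ((ch :: cur).reverse) = pvG cur.reverse ++ [PySem.Chars.lowerChar ch] := by
          rw [List.reverse_cons, pvG_append_single, if_neg hp]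
        have hal : (pvG cur.reverse ++ [PySem.Chars.lowerChar ch]).all PySem.Chars.isalpha
            = ((pvG cur.reverse).all PySem.Chars.isalpha && PySem.Chars.isalpha (PySem.Chars.lowerChar ch)) := by
          simp
        have h := ih (ch :: cur) acc
        rw [hgl, hal] at h
        rw [show pbFold (ch :: rest) (pvKept acc.reverse) (pvG cur.reverse)
              ((pvG cur.reverse).all PySem.Chars.isalpha)
            = pbFold rest (pvKept acc.reverse) (pvG cur.reverse ++ [PySem.Chars.lowerChar ch])
              ((pvG cur.reverse).all PySem.Chars.isalpha && PySem.Chars.isalpha (PySem.Chars.lowerChar ch)) from by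
          simp [pbFold, hsp, hp']]
        exact h

theorem preprocess_eq (caption : String) :
    preprocess_caption_A caption = preprocess_caption_B caption := by
  unfold preprocess_caption_A preprocess_caption_B
  have h := pbFold_eq_kept caption.toList [] []
  rw [show pvG (([] : List Char).reverse) = [] from rfl,
      show (([] : List Char).all PySem.Chars.isalpha) = true from rfl,
      show pvKept (([] : List (List Char)).reverse) = [] from rfl] at h
  rw [h]
  simp only [pvKept, PySem.Chars.split₀, List.map_map]
  rfl

-- the index-assignment loop over range(len(cs)) maps f over cs
theorem setLoop_eq (f : String → String) :
    ∀ (zs ys : List String),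
      (PySem.List.pyRange (ys.length : Int) ((ys.length + zs.length : Nat) : Int) 1).foldl
        (fun cs i => cs.set i.toNat (f (PySem.List.pyGetD cs i ""))) (ys ++ zs)
      = ys ++ zs.map f := by
  intro zs
  induction zs with
  | nil => intro ys; simp [PySem.List.pyRange_one_eq_nil]
  | cons z zs ih =>
    intro ys
    rw [PySem.List.pyRange_one_cons (by simp only [List.length_cons]; push_cast; omega)]
    simp only [List.foldl_cons]
    have hget : PySem.List.pyGetD (ys ++ z :: zs) (ys.length : Int) "" = z := by
      rw [PySem.List.pyGetD_natCast]
      simp [List.getD]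
    have hset2 : (ys ++ z :: zs).set ((ys.length : Int)).toNat (f z) = (ys ++ [f z]) ++ zs := by
      simp [List.append_assoc]
    rw [hget, hset2]
    have key : ((ys.length : Int) + 1) = (((ys ++ [f z]).length : Nat) : Int) := by simp
    have key2 : (((ys.length + (z :: zs).length : Nat) : Int))
        = (((ys ++ [f z]).length + zs.length : Nat) : Int) := by
      simp only [List.length_append, List.length_cons, List.length_nil]; push_cast; ring
    rw [key, key2, ih (ys ++ [f z])]
    simp

theorem cleanLoop_eq (cs : List String) : pvCleanLoopA cs = cs.map preprocess_caption_A := by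
  have := setLoop_eq preprocess_caption_A cs []
  simpa [pvCleanLoopA] using this

-- ===== VERDICT (by name: the statement is the Claim_ definition above) =====
theorem clean_captions_spec : Claim_equal_clean_captions := by
  intro l _
  unfold Spec_clean_captions clean_captions clean_captions_alt
  refine List.map_congr_left fun p _ => ?_
  rw [cleanLoop_eq]
  exact congrArg _ (List.map_congr_left fun s _ => preprocess_eq s)
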